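-- pv_equiv track=rewrite | github.com/dgsim126/Algo_Study_2 | Programmers/심동근/2504/250410/민정이와 광직이의 알파벳 공부.py | solution
-- ===== SOURCE A (Python) =====
-- from itertools import combinations
--
-- def solution(N, lst):
--     result= 0
--
--     for i in range(1, N+1):
--         for comb in combinations(lst, i):
--             set_= set()
--             for word in comb:
--                 set_.update(word)
--             if(len(set_)==26):
--                 result+=1
--
--     return result
-- ===== SOURCE B (Python) =====
-- def solution(N, lst):
--     # take/skip recursion over the word list, sharing the accumulated character set
--     def go(ws, chars, size):
--         if not ws:
--             return 1 if 1 <= size <= N and len(chars) == 26 else 0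
--         return go(ws[1:], chars.union(ws[0]), size + 1) + go(ws[1:], chars, size)
--
--     return go(lst, set(), 0)
-- ===== Notes on version B (the rewrite author's own statement) =====
-- stated objective: alternative
-- what changed: Replaces the per-size itertools.combinations sweeps (rebuilding each subset's character set from scratch) with a single take/skip recursion over the word list that threads the accumulated character set and subset size, visiting each subset once at a leaf.
import Mathlib
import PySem

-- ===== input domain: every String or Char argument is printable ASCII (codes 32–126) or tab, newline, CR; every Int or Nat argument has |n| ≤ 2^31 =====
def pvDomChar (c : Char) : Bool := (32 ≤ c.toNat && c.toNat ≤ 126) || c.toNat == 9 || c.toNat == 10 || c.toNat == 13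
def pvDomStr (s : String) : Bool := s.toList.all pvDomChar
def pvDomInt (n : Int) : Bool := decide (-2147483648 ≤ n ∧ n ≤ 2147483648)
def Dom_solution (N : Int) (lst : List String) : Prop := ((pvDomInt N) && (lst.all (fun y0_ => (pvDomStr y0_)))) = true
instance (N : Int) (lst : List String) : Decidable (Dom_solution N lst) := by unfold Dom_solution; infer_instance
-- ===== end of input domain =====

-- B replaces the per-size combinations sweeps with one take/skip recursion threading the character set; return values agree everywhere.

-- ===== PORT A =====
-- itertools.combinations(lst, k) in itertools' order (those containing the head first)
def pvCombs : List String → Nat → List (List String)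
  | _, 0 => [[]]
  | [], _+1 => []
  | x :: xs, k+1 => (pvCombs xs k).map (fun c => x :: c) ++ pvCombs xs (k+1)

-- set_ = set(); for word in comb: set_.update(word)
def pvUnionAll (comb : List String) : PySem.Set Char :=
  comb.foldl (fun s w => PySem.Set.update s w.toList) PySem.Set.empty

def solution (N : Int) (lst : List String) : Int :=
  (PySem.List.pyRange 1 (N + 1) 1).foldl (fun result i =>
    (pvCombs lst i.toNat).foldl (fun result comb =>
      if PySem.Set.len (pvUnionAll comb) = 26 then result + 1 else result) result) 0

-- ===== PORT B =====
def pvGo (N : Int) : List String → PySem.Set Char → Int → Int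
  | [], chars, size => if 1 ≤ size ∧ size ≤ N ∧ PySem.Set.len chars = 26 then 1 else 0
  | w :: ws, chars, size =>
      pvGo N ws (PySem.Set.union chars w.toList) (size + 1) + pvGo N ws chars size

def solution_alt (N : Int) (lst : List String) : Int :=
  pvGo N lst PySem.Set.empty 0

-- ===== PRECONDITION & SPEC =====
def Spec_solution (N : Int) (lst : List String) (out : Int) : Prop := out = solution_alt N lst
instance (N : Int) (lst : List String) (out : Int) : Decidable (Spec_solution N lst out) := by unfold Spec_solution; infer_instance

-- ===== CLAIM (what is proved, stated in full; the proofs are below) =====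
def Claim_equal_solution : Prop := ∀ (N : Int) (lst : List String), Dom_solution N lst → Spec_solution N lst (solution N lst)

-- ===== LEMMAS AND PROOFS =====

-- all sublists of ws, in the take-branch-first order pvGo visits them
def pvSub : List String → List (List String)
  | [] => [[]]
  | w :: ws => (pvSub ws).map (fun s => w :: s) ++ pvSub ws

def pvGood (chars : PySem.Set Char) (s : List String) : Bool :=
  decide (PySem.Set.len (s.foldl (fun t w => PySem.Set.update t w.toList) chars) = 26)

theorem pvGo_spec (N : Int) (ws : List String) (chars : PySem.Set Char) (size : Int) :
    pvGo N ws chars size =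
      ((pvSub ws).countP (fun s =>
        decide (1 ≤ size + (s.length : Int) ∧ size + (s.length : Int) ≤ N) && pvGood chars s) : Int) := by
  induction ws generalizing chars size with
  | nil =>
      simp only [pvGo, pvSub, List.countP_cons, List.countP_nil, pvGood, List.foldl_nil,
        List.length_nil]
      split_ifs with h <;> simp_all
  | cons w ws ih =>
      simp only [pvGo, pvSub, List.countP_append, List.countP_map]
      rw [ih (PySem.Set.union chars w.toList) (size + 1), ih chars size]
      have hfun : ((fun s : List String =>
            decide (1 ≤ size + (s.length : Int) ∧ size + (s.length : Int) ≤ N) && pvGood chars s)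
              ∘ (fun s => w :: s))
          = (fun s : List String =>
            decide (1 ≤ (size + 1) + (s.length : Int) ∧ (size + 1) + (s.length : Int) ≤ N) &&
              pvGood (PySem.Set.union chars w.toList) s) := by
        funext s
        simp only [Function.comp, List.length_cons]
        have h1 : (1 ≤ size + ((s.length + 1 : Nat) : Int) ∧ size + ((s.length + 1 : Nat) : Int) ≤ N)
            ↔ (1 ≤ (size + 1) + ((s.length : Nat) : Int) ∧ (size + 1) + ((s.length : Nat) : Int) ≤ N) := by
          push_cast; constructor <;> intro h <;> omega
        rw [decide_eq_decide.mpr h1]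
        rfl
      rw [hfun]
      push_cast
      ring

theorem pvCombs_countP (l : List String) (k : Nat) (p : List String → Bool) :
    (pvCombs l k).countP p = (pvSub l).countP (fun s => (s.length == k) && p s) := by
  induction l generalizing k p with
  | nil =>
      cases k with
      | zero => simp [pvCombs, pvSub]
      | succ k => simp [pvCombs, pvSub]
  | cons x xs ih =>
      cases k with
      | zero =>
          simp only [pvCombs, pvSub, List.countP_append, List.countP_map]
          rw [← ih 0 p]
          have hz : ((fun s : List String => (s.length == 0) && p s) ∘ (fun s => x :: s))
              = fun _ => false := by
            funext s; simp
          rw [hz]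
          simp [pvCombs]
      | succ k =>
          simp only [pvCombs, pvSub, List.countP_append, List.countP_map, Function.comp_def]
          have hc : (fun c : List String => ((x :: c).length == k + 1) && p (x :: c))
              = fun s : List String => (s.length == k) && p (x :: s) := by
            funext s
            simp
          rw [hc, ih k (fun s => p (x :: s)), ih (k + 1) p]

-- countP splits over a pointwise-disjoint disjunction
theorem countP_or_disjoint {α : Type} (l : List α) (p q : α → Bool)
    (h : ∀ a, ¬(p a = true ∧ q a = true)) :
    l.countP (fun a => p a || q a) = l.countP p + l.countP q := by
  induction l with
  | nil => simp
  | cons a l ih =>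
      simp only [List.countP_cons, ih]
      by_cases hp : p a = true <;> by_cases hq : q a = true <;> simp_all <;> omega

theorem pvSum (M : Nat) (l : List (List String)) (g : List String → Bool) :
    ((List.range M).map (fun k => (l.countP (fun s => (s.length == k + 1) && g s) : Int))).sum
      = (l.countP (fun s => decide (1 ≤ s.length ∧ s.length ≤ M) && g s) : Int) := by
  induction M with
  | zero =>
      simp only [List.range_zero, List.map_nil, List.sum_nil]
      have hf : (fun s : List String => decide (1 ≤ s.length ∧ s.length ≤ 0) && g s)
          = fun _ => false := by
        funext s
        have h : ¬(1 ≤ s.length ∧ s.length ≤ 0) := by omega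
        rw [decide_eq_false h, Bool.false_and]
      rw [hf]; simp
  | succ M ih =>
      rw [List.range_succ, List.map_append, List.sum_append, ih]
      simp only [List.map_cons, List.map_nil, List.sum_cons, List.sum_nil, add_zero]
      have hsplit : (fun s : List String => decide (1 ≤ s.length ∧ s.length ≤ M + 1) && g s)
          = fun s : List String =>
              ((fun s : List String => decide (1 ≤ s.length ∧ s.length ≤ M) && g s) s ||
               (fun s : List String => (s.length == M + 1) && g s) s) := by
        funext s
        by_cases h2 : (1 ≤ s.length ∧ s.length ≤ M)
        · have h3 : s.length ≠ M + 1 := by omega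
          have h1 : (1 ≤ s.length ∧ s.length ≤ M + 1) := by omega
          simp [decide_eq_true h1, decide_eq_true h2, h3]
        · by_cases h3 : s.length = M + 1
          · have h1 : (1 ≤ s.length ∧ s.length ≤ M + 1) := by omega
            simp [h3]
          · have h1 : ¬(1 ≤ s.length ∧ s.length ≤ M + 1) := by omega
            simp [decide_eq_false h1, decide_eq_false h2, h3]
      rw [hsplit, countP_or_disjoint _ _ _ (by
        intro s
        rintro ⟨h2, h3⟩
        simp only [Bool.and_eq_true, decide_eq_true_eq, beq_iff_eq] at h2 h3
        omega)]
      push_cast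
      ring

-- ===== VERDICT (by name: the statement is the Claim_ definition above) =====
theorem solution_spec : Claim_equal_solution := by
  intro N lst _
  show solution N lst = solution_alt N lst
  unfold solution solution_alt
  rw [pvGo_spec]
  have hinner : ∀ (r i : Int),
      (pvCombs lst i.toNat).foldl (fun result comb =>
        if PySem.Set.len (pvUnionAll comb) = 26 then result + 1 else result) r
      = r + ((pvCombs lst i.toNat).countP (fun c => decide (PySem.Set.len (pvUnionAll c) = 26)) : Int) := by
    intro r i
    exact PySem.List.foldl_ite_add_one _ _ _
  simp only [hinner]
  rw [PySem.List.foldl_add _ (fun i : Int =>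
    ((pvCombs lst i.toNat).countP (fun c => decide (PySem.Set.len (pvUnionAll c) = 26)) : Int))]
  rw [PySem.List.pyRange_one, List.map_map]
  by_cases hN : N ≤ 0
  · have h0 : (N + 1 - 1).toNat = 0 := by omega
    rw [h0]
    simp only [List.range_zero, List.map_nil, List.sum_nil]
    have hf : (fun s : List String =>
        decide (1 ≤ (0:Int) + (s.length : Int) ∧ (0:Int) + (s.length : Int) ≤ N) &&
          pvGood PySem.Set.empty s) = fun _ => false := by
      funext s
      have h : ¬(1 ≤ (0:Int) + (s.length : Int) ∧ (0:Int) + (s.length : Int) ≤ N) := by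
        intro h; omega
      rw [decide_eq_false h, Bool.false_and]
    rw [hf]; simp
  · have hM : (N + 1 - 1).toNat = N.toNat := by omega
    rw [hM]
    have hmap : ∀ k ∈ List.range N.toNat,
        ((fun i : Int =>
          ((pvCombs lst i.toNat).countP (fun c => decide (PySem.Set.len (pvUnionAll c) = 26)) : Int))
            ∘ (fun k : Nat => (1 : Int) + k)) k
        = ((pvSub lst).countP (fun s =>
            (s.length == k + 1) && decide (PySem.Set.len (pvUnionAll s) = 26)) : Int) := by
      intro k _
      simp only [Function.comp]
      have ht : ((1 : Int) + (k : Nat)).toNat = k + 1 := by omega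
      rw [ht, pvCombs_countP]
    rw [List.map_congr_left hmap, pvSum]
    have hfin : (fun s : List String =>
          decide (1 ≤ s.length ∧ s.length ≤ N.toNat) && decide (PySem.Set.len (pvUnionAll s) = 26))
        = fun s : List String =>
          decide (1 ≤ (0:Int) + (s.length : Int) ∧ (0:Int) + (s.length : Int) ≤ N) &&
            pvGood PySem.Set.empty s := by
      funext s
      have h1 : (1 ≤ s.length ∧ s.length ≤ N.toNat)
          ↔ (1 ≤ (0:Int) + (s.length : Int) ∧ (0:Int) + (s.length : Int) ≤ N) := by
        constructor <;> intro h <;> constructor <;> omega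
      rw [decide_eq_decide.mpr h1]
      rfl
    rw [hfin]
    omega
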